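-- pv_equiv track=rewrite | github.com/Nidryen-zh/QuerierAwareResponder | data/wechat/extract_two_role_diag.py | extract_conversations_between_two_role
-- ===== SOURCE A (Python) =====
-- def extract_conversations_between_two_role(conversations, role1, role2):
--     def maybe_append_conversation(conv, role1, role2):
--         roles = set([item['from'] for item in conv])
--         if role1 in roles and role2 in roles and len(roles) == 2:
--             return True
--         return False
--
--     new_conversations = []
--     start_flag = False
--     start_idx = 0
--     end_idx = 0
--     for i, conversation in enumerate(conversations):
--         if not start_flag and (conversation['from'] == role1 or conversation['from'] == role2):
--             start_flag = True
--             start_idx = i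
--             end_idx = i
--             continue
--         if start_flag:
--             if conversation['from'] == role1 or conversation['from'] == role2:
--                 end_idx = i
--                 continue
--             elif maybe_append_conversation(conversations[start_idx:end_idx+1], role1, role2):
--                 new_conversations.append(conversations[start_idx:end_idx+1])
--             start_flag = False
--     return new_conversations
-- ===== SOURCE B (Python) =====
-- def extract_conversations_between_two_role(conversations, role1, role2):
--     # Phase 1: split the list into maximal runs of consecutive items that share
--     # the same key (whether item['from'] is one of the two roles).
--     runs = []
--     cur_key = None
--     cur = []
--     for item in conversations:
--         k = item['from'] == role1 or item['from'] == role2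
--         if cur and k != cur_key:
--             runs.append((cur_key, cur))
--             cur = []
--         cur_key = k
--         cur.append(item)
--     # the final run is never terminated by a non-matching item, so it is dropped
--     # Phase 2: keep the matching runs in which both (distinct) roles appear.
--     return [run for key, run in runs
--             if key
--             and role1 != role2
--             and any(c['from'] == role1 for c in run)
--             and any(c['from'] == role2 for c in run)]
-- ===== Notes on version B (the rewrite author's own statement) =====
-- stated objective: alternative
-- what changed: Replaces A's index-tracking flag machine (start/end indices, re-slicing conversations and building a set of roles per segment) by a two-phase pipeline: group the list into maximal runs by whether the item's role matches, then filter the runs that contain both distinct roles; the unterminated final run is dropped as in A.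
import Mathlib
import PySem

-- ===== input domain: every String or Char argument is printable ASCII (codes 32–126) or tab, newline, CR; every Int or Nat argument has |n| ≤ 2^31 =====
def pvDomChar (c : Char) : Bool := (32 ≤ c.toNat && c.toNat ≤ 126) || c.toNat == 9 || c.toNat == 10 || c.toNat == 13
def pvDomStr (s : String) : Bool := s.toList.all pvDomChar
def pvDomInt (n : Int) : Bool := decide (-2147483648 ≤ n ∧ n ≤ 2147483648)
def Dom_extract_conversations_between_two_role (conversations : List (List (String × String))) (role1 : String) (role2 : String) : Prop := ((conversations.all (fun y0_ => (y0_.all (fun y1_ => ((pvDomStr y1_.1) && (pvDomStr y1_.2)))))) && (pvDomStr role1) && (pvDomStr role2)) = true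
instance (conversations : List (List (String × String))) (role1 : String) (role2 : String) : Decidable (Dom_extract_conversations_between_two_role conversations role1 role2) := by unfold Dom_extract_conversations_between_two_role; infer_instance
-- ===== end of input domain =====

-- B replaces A's index-tracking flag machine (start/end indices, re-slicing, per-segment role set)
-- by a two-phase pipeline: group into maximal runs by role-match, then filter the runs containing
-- both distinct roles (the unterminated final run is dropped, as in A).

-- item['from'] on an association-list dict: first match; total under Pre_ (the key is present)
def pvFrom (c : List (String × String)) : String := (List.lookup "from" c).getD ""

-- ===== PORT A =====
def maybe_append_conversation (conv : List (List (String × String))) (role1 : String) (role2 : String) : Bool :=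
  let roles := PySem.Set.ofList (conv.map (fun item => pvFrom item))
  if roles.contains role1 && roles.contains role2 && roles.length == 2 then true else false

def stepA (conversations : List (List (String × String))) (role1 : String) (role2 : String)
    (st : List (List (List (String × String))) × Bool × Int × Int)
    (ic : Int × List (String × String)) :
    List (List (List (String × String))) × Bool × Int × Int :=
  let (new_conversations, start_flag, start_idx, end_idx) := st
  let (i, conversation) := ic
  if !start_flag && (pvFrom conversation == role1 || pvFrom conversation == role2) then
    (new_conversations, true, i, i)
  else if start_flag then
    if pvFrom conversation == role1 || pvFrom conversation == role2 then
      (new_conversations, start_flag, start_idx, i)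
    else if maybe_append_conversation (PySem.List.slice conversations (some start_idx) (some (end_idx + 1))) role1 role2 then
      (new_conversations ++ [PySem.List.slice conversations (some start_idx) (some (end_idx + 1))], false, start_idx, end_idx)
    else
      (new_conversations, false, start_idx, end_idx)
  else st

def extract_conversations_between_two_role (conversations : List (List (String × String))) (role1 : String) (role2 : String) : List (List (List (String × String))) :=
  ((PySem.List.enumerate conversations 0).foldl (stepA conversations role1 role2) ([], false, 0, 0)).1

-- ===== PORT B =====
def stepB (role1 : String) (role2 : String)
    (st : List (Option Bool × List (List (String × String))) × Option Bool × List (List (String × String)))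
    (item : List (String × String)) :
    List (Option Bool × List (List (String × String))) × Option Bool × List (List (String × String)) :=
  let (runs, cur_key, cur) := st
  let k := pvFrom item == role1 || pvFrom item == role2
  if cur ≠ [] ∧ some k ≠ cur_key then
    (runs ++ [(cur_key, cur)], some k, [item])
  else
    (runs, some k, cur ++ [item])

def extract_conversations_between_two_role_alt (conversations : List (List (String × String))) (role1 : String) (role2 : String) : List (List (List (String × String))) :=
  let st := conversations.foldl (stepB role1 role2) ([], none, [])
  -- the pending run st.2.2 is never terminated and is dropped
  st.1.filterMap (fun kr =>
    if kr.1.getD false && decide (role1 ≠ role2)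
        && kr.2.any (fun c => pvFrom c == role1) && kr.2.any (fun c => pvFrom c == role2)
    then some kr.2 else none)

-- ===== PRECONDITION & SPEC =====
-- Pre_ excludes exactly the inputs where some conversation lacks the key "from": there Python A raises KeyError.
def Pre_extract_conversations_between_two_role (conversations : List (List (String × String))) (role1 : String) (role2 : String) : Prop :=
  -- a typical admitted input: conversations = [[("from", "alice"), ("value", "hi")], [("from", "bob"), ("value", "yo")],
  -- [("from", "carol"), ("value", "mm")]] with role1 = "alice", role2 = "bob" (every item carries the key "from")
  ∀ c ∈ conversations, (List.lookup "from" c).isSome = true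
instance (conversations : List (List (String × String))) (role1 : String) (role2 : String) : Decidable (Pre_extract_conversations_between_two_role conversations role1 role2) := by unfold Pre_extract_conversations_between_two_role; infer_instance

def pvWitness_extract_conversations_between_two_role : (List (List (String × String))) × String × String :=
  ([[("from", "a"), ("value", "hi")], [("from", "b"), ("value", "yo")], [("from", "c"), ("value", "x")]], "a", "b")

def Spec_extract_conversations_between_two_role (conversations : List (List (String × String))) (role1 : String) (role2 : String) (out : List (List (List (String × String)))) : Prop := out = extract_conversations_between_two_role_alt conversations role1 role2
instance (conversations : List (List (String × String))) (role1 : String) (role2 : String) (out : List (List (List (String × String)))) : Decidable (Spec_extract_conversations_between_two_role conversations role1 role2 out) := by unfold Spec_extract_conversations_between_two_role; infer_instance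

-- ===== CLAIM (what is proved, stated in full; the proofs are below) =====
def Claim_equal_extract_conversations_between_two_role : Prop := ∀ (conversations : List (List (String × String))) (role1 : String) (role2 : String), Dom_extract_conversations_between_two_role conversations role1 role2 → Pre_extract_conversations_between_two_role conversations role1 role2 → Spec_extract_conversations_between_two_role conversations role1 role2 (extract_conversations_between_two_role conversations role1 role2)

-- ===== LEMMAS AND PROOFS =====

-- whether an item's sender is one of the two roles
def pvMatch (role1 role2 : String) (c : List (String × String)) : Bool :=
  pvFrom c == role1 || pvFrom c == role2

-- reference grouping: maximal runs of equal key, pending run dropped at the end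
def pvRuns (role1 role2 : String) :
    List (List (String × String)) → Option Bool → List (List (String × String)) →
    List (Option Bool × List (List (String × String)))
  | [], _, _ => []
  | x :: rest, key, cur =>
    let k := pvMatch role1 role2 x
    if cur ≠ [] ∧ some k ≠ key then (key, cur) :: pvRuns role1 role2 rest (some k) [x]
    else pvRuns role1 role2 rest (some k) (cur ++ [x])

def pvKeep (role1 role2 : String) (kr : Option Bool × List (List (String × String))) :
    Option (List (List (String × String))) :=
  if kr.1.getD false && decide (role1 ≠ role2)
      && kr.2.any (fun c => pvFrom c == role1) && kr.2.any (fun c => pvFrom c == role2)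
  then some kr.2 else none

lemma foldB_runs (role1 role2 : String) :
    ∀ (xs : List (List (String × String))) runs key cur,
      (xs.foldl (stepB role1 role2) (runs, key, cur)).1 = runs ++ pvRuns role1 role2 xs key cur := by
  intro xs
  induction xs with
  | nil => intro runs key cur; simp [pvRuns]
  | cons x rest ih =>
    intro runs key cur
    simp only [List.foldl_cons, stepB, pvRuns, pvMatch]
    by_cases h : cur ≠ [] ∧ some (pvFrom x == role1 || pvFrom x == role2) ≠ key
    · simp [h, ih]
    · simp [h, ih]

lemma ok_eq (role1 role2 : String) (r : List (List (String × String)))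
    (hall : ∀ c ∈ r, pvMatch role1 role2 c = true) :
    maybe_append_conversation r role1 role2 =
      (decide (role1 ≠ role2) && r.any (fun c => pvFrom c == role1) && r.any (fun c => pvFrom c == role2)) := by
  unfold maybe_append_conversation
  set S := PySem.Set.ofList (r.map (fun item => pvFrom item)) with hS
  have hnd : S.Nodup := PySem.Set.nodup_ofList _
  have hcard := List.toFinset_card_of_nodup hnd
  have hm1 : (role1 ∈ S) ↔ (r.any (fun c => pvFrom c == role1) = true) := by
    simp [hS, PySem.Set.mem_ofList, List.any_eq_true]
  have hm2 : (role2 ∈ S) ↔ (r.any (fun c => pvFrom c == role2) = true) := by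
    simp [hS, PySem.Set.mem_ofList, List.any_eq_true]
  have hsub : ∀ x ∈ S, x = role1 ∨ x = role2 := by
    intro x hx
    rw [hS, PySem.Set.mem_ofList] at hx
    obtain ⟨c, hc, rfl⟩ := List.mem_map.mp hx
    have := hall c hc
    simp only [pvMatch, Bool.or_eq_true, beq_iff_eq] at this
    tauto
  cases h1 : r.any (fun c => pvFrom c == role1) <;> cases h2 : r.any (fun c => pvFrom c == role2)
  · simp [hm1, hm2, h1, h2]
  · simp [hm1, hm2, h1, h2]
  · simp [hm1, hm2, h1, h2]
  · have hmem1 : role1 ∈ S := hm1.mpr h1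
    have hmem2 : role2 ∈ S := hm2.mpr h2
    by_cases hrr : role1 = role2
    · have hsub1 : S.toFinset ⊆ {role1} := by
        intro x hx
        rcases hsub x (List.mem_toFinset.mp hx) with h | h <;> simp [h, hrr]
      have : S.length ≤ 1 := by
        calc S.length = S.toFinset.card := hcard.symm
        _ ≤ ({role1} : Finset String).card := Finset.card_le_card hsub1
        _ = 1 := Finset.card_singleton _
      simp [hm2, h2, hrr]
      omega
    · have hfin : S.toFinset = {role1, role2} := by
        apply Finset.Subset.antisymm
        · intro x hx
          rcases hsub x (List.mem_toFinset.mp hx) with h | h <;> simp [h]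
        · intro x hx
          rcases Finset.mem_insert.mp hx with h | h
          · exact List.mem_toFinset.mpr (h ▸ hmem1)
          · exact List.mem_toFinset.mpr ((Finset.mem_singleton.mp h) ▸ hmem2)
      have hlen : S.length = 2 := by
        rw [← hcard, hfin, Finset.card_insert_of_notMem (by simp [hrr]), Finset.card_singleton]
      simp [hm1, hm2, h1, h2, hrr, hlen]

lemma loopA_spec (role1 role2 : String) (xs : List (List (String × String))) :
    ∀ (n : Nat) (rest : List (List (String × String))), rest.length = n →
      ((∀ (i s : Nat) acc r, xs.drop i = rest → s ≤ i → (xs.drop s).take (i - s) = r → r ≠ [] →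
          (∀ c ∈ r, pvMatch role1 role2 c = true) →
          ((PySem.List.enumerate rest i).foldl (stepA xs role1 role2) (acc, true, (s : Int), (i : Int) - 1)).1
            = acc ++ (pvRuns role1 role2 rest (some true) r).filterMap (pvKeep role1 role2)) ∧
       (∀ (i : Nat) acc (s0 e0 : Int) key cur, xs.drop i = rest → (key = some false ∨ cur = []) →
          ((PySem.List.enumerate rest i).foldl (stepA xs role1 role2) (acc, false, s0, e0)).1
            = acc ++ (pvRuns role1 role2 rest key cur).filterMap (pvKeep role1 role2))) := by
  intro n
  induction n with
  | zero =>
    intro rest hlen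
    rw [List.length_eq_zero_iff] at hlen; subst hlen
    constructor
    · intro i s acc r _ _ _ _ _
      simp [PySem.List.enumerate, pvRuns]
    · intro i acc s0 e0 key cur _ _
      simp [PySem.List.enumerate, pvRuns]
  | succ n ih =>
    intro rest hlen
    cases rest with
    | nil => simp at hlen
    | cons x rest' =>
      have hlen' : rest'.length = n := by simpa using hlen
      obtain ⟨ihT, ihF⟩ := ih rest' hlen'
      have hcast : ∀ (j : Nat), (j : Int) + 1 = ((j + 1 : Nat) : Int) := by intro j; push_cast; ring
      constructor
      · intro i s acc r hdrop hsi htake hne hall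
        have hx : xs[i]? = some x := by rw [← List.head?_drop, hdrop]; rfl
        have hdrop' : xs.drop (i + 1) = rest' := by
          rw [← List.tail_drop, hdrop]; rfl
        rw [PySem.List.enumerate_cons, List.foldl_cons]
        by_cases hm : pvMatch role1 role2 x = true
        · -- run continues
          have hm' : (pvFrom x == role1 || pvFrom x == role2) = true := hm
          have htake' : (xs.drop s).take (i + 1 - s) = r ++ [x] := by
            have h1 : i + 1 - s = (i - s) + 1 := by omega
            rw [h1, List.take_add_one, htake, List.getElem?_drop]
            have h2 : s + (i - s) = i := by omega
            rw [h2, hx]; rfl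
          have hstep : stepA xs role1 role2 (acc, true, (s : Int), (i : Int) - 1) ((i : Int), x)
              = (acc, true, (s : Int), (i : Int)) := by
            simp [stepA, hm']
          rw [hstep]
          have hrec := ihT (i + 1) s acc (r ++ [x]) hdrop' (by omega) htake' (by simp) (by
            intro c hc; rcases List.mem_append.mp hc with h | h
            · exact hall c h
            · simp at h; subst h; exact hm)
          rw [show ((i + 1 : Nat) : Int) = (i : Int) + 1 by push_cast; ring] at hrec
          rw [show ((i : Int) + 1 - 1) = (i : Int) by ring] at hrec
          rw [hrec]
          have hruns : pvRuns role1 role2 (x :: rest') (some true) r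
              = pvRuns role1 role2 rest' (some true) (r ++ [x]) := by
            simp [pvRuns, hm]
          rw [hruns]
        · -- run ends here
          have hm' : (pvFrom x == role1 || pvFrom x == role2) = false := by
            simpa [pvMatch] using hm
          have hsl : PySem.List.slice xs (some (s : Int)) (some ((i : Int) - 1 + 1)) = r := by
            rw [show ((i : Int) - 1 + 1) = ((i : Nat) : Int) by ring, PySem.List.slice_natCast, htake]
          have hstep : stepA xs role1 role2 (acc, true, (s : Int), (i : Int) - 1) ((i : Int), x)
              = (acc ++ (if maybe_append_conversation r role1 role2 then [r] else []), false, (s : Int), (i : Int) - 1) := by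
            simp only [stepA, hm', Bool.not_true]
            rw [hsl]
            by_cases hma : maybe_append_conversation r role1 role2 = true <;> simp [hma]
          rw [hstep]
          have hrec := ihF (i + 1) (acc ++ (if maybe_append_conversation r role1 role2 then [r] else []))
            (s : Int) ((i : Int) - 1) (some false) [x] hdrop' (Or.inl rfl)
          rw [show ((i + 1 : Nat) : Int) = (i : Int) + 1 by push_cast; ring] at hrec
          rw [hrec]
          have hruns : pvRuns role1 role2 (x :: rest') (some true) r
              = (some true, r) :: pvRuns role1 role2 rest' (some false) [x] := by
            simp [pvRuns, hm, hne]
          rw [hruns, List.filterMap_cons]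
          have hkeep : pvKeep role1 role2 (some true, r)
              = if maybe_append_conversation r role1 role2 then some r else none := by
            rw [show pvKeep role1 role2 (some true, r) = if (decide (role1 ≠ role2) && r.any (fun c => pvFrom c == role1) && r.any (fun c => pvFrom c == role2)) = true then some r else none from rfl]
            rw [← ok_eq role1 role2 r hall]
          rw [hkeep]
          split <;> simp
      · -- false state
        intro i acc s0 e0 key cur hdrop hkey
        have hdrop' : xs.drop (i + 1) = rest' := by
          rw [← List.tail_drop, hdrop]; rfl
        rw [PySem.List.enumerate_cons, List.foldl_cons]
        by_cases hm : pvMatch role1 role2 x = true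
        · have hm' : (pvFrom x == role1 || pvFrom x == role2) = true := hm
          have hstep : stepA xs role1 role2 (acc, false, s0, e0) ((i : Int), x)
              = (acc, true, (i : Int), (i : Int)) := by
            simp [stepA, hm']
          rw [hstep]
          have hrec := ihT (i + 1) i acc [x] hdrop' (by omega) (by
              rw [show i + 1 - i = 1 by omega]
              rw [List.take_one, List.head?_drop, ← List.head?_drop, hdrop]; rfl)
            (by simp) (by intro c hc; simp at hc; subst hc; exact hm)
          rw [show ((i + 1 : Nat) : Int) = (i : Int) + 1 by push_cast; ring] at hrec
          rw [show ((i : Int) + 1 - 1) = (i : Int) by ring] at hrec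
          rw [hrec]
          have hruns : (pvRuns role1 role2 (x :: rest') key cur).filterMap (pvKeep role1 role2)
              = (pvRuns role1 role2 rest' (some true) [x]).filterMap (pvKeep role1 role2) := by
            rcases hkey with hk | hk
            · subst hk
              by_cases hc : cur = []
              · subst hc; simp [pvRuns, hm]
              · simp [pvRuns, hm, hc, pvKeep]
            · subst hk; simp [pvRuns, hm]
          rw [hruns]
        · have hm' : (pvFrom x == role1 || pvFrom x == role2) = false := by
            simpa [pvMatch] using hm
          have hstep : stepA xs role1 role2 (acc, false, s0, e0) ((i : Int), x)
              = (acc, false, s0, e0) := by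
            simp [stepA, hm']
          rw [hstep]
          have hrec := ihF (i + 1) acc s0 e0 (some false) (cur ++ [x]) hdrop' (Or.inl rfl)
          rw [show ((i + 1 : Nat) : Int) = (i : Int) + 1 by push_cast; ring] at hrec
          rw [hrec]
          have hruns : pvRuns role1 role2 (x :: rest') key cur
              = pvRuns role1 role2 rest' (some false) (cur ++ [x]) := by
            rcases hkey with hk | hk
            · subst hk; simp [pvRuns, pvMatch, hm']
            · subst hk; simp [pvRuns, pvMatch, hm']
          rw [hruns]

-- ===== VERDICT (by name: the statement is the Claim_ definition above) =====
theorem extract_conversations_between_two_role_spec : Claim_equal_extract_conversations_between_two_role := by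
  intro conversations role1 role2 _ _
  unfold Spec_extract_conversations_between_two_role
  unfold extract_conversations_between_two_role extract_conversations_between_two_role_alt
  have hA := (loopA_spec role1 role2 conversations conversations.length conversations rfl).2
      0 [] 0 0 none [] rfl (Or.inr rfl)
  have hB := foldB_runs role1 role2 conversations [] none []
  simp only [Nat.cast_zero] at hA
  rw [hA]
  simp [pvKeep, hB]
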